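-- pv_equiv track=rewrite | github.com/GaryDoooo/ml_codes | PPTX_and_stats/utilities.py | group_by2factors
-- ===== SOURCE A (Python) =====
-- def grouping_by_labels(data_list, grouping_list):
--     data = [(i, j) for i, j in zip(grouping_list, data_list)]
--     data.sort(key=lambda x: x[0])
--     subgroup, res = [], []
--     prev_i = None
--     for i, j in data:
--         if prev_i != i:
--             res.append(subgroup)
--             subgroup = []
--         subgroup.append(j)
--         prev_i = i
--     res.append(subgroup)
--     return res[1:]
--
-- def group_by2factors(f1, f2, d):
--     f2_d = [(i, j) for i, j in zip(f2, d)]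
--     gf1 = grouping_by_labels(f2_d, f1)
--     res = []
--     for sublist in gf1:
--         factor = [i[0] for i in sublist]
--         data = [i[1] for i in sublist]
--         res.append(grouping_by_labels(
--             data, factor))
--     return res
-- ===== SOURCE B (Python) =====
-- def grouping_by_labels(data_list, grouping_list):
--     groups = {}
--     for lab, item in zip(grouping_list, data_list):
--         groups.setdefault(lab, []).append(item)
--     return [groups[k] for k in sorted(groups)]
--
-- def group_by2factors(f1, f2, d):
--     pairs = list(zip(f2, d))
--     outer = grouping_by_labels(pairs, f1)
--     return [grouping_by_labels([p[1] for p in g], [p[0] for p in g])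
--             for g in outer]
-- ===== Notes on version B (the rewrite author's own statement) =====
-- stated objective: simpler
-- what changed: grouping_by_labels now groups via a dict built in one pass over the input (setdefault/append) and emits groups in sorted-key order, instead of stable-sorting the (label, item) pairs and boundary-scanning for label changes with an empty-sentinel res[1:].
import Mathlib
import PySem

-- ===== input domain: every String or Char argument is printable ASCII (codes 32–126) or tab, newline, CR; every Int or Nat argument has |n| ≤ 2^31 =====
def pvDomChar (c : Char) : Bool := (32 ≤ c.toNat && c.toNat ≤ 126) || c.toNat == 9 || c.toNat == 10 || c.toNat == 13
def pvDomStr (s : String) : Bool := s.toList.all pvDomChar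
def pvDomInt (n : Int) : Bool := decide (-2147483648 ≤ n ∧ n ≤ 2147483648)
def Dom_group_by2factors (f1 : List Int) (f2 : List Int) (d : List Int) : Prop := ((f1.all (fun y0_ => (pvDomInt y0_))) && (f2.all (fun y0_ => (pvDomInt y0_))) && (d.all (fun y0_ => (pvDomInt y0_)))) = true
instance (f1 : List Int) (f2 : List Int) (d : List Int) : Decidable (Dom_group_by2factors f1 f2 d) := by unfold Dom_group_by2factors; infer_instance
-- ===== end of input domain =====

-- B replaces A's stable-sort-plus-boundary-scan grouping (with its empty-sentinel res[1:]) by a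
-- dict of lists built in one pass and emitted in sorted-key order: an alternative decomposition of
-- the same grouping task (no speed claim).

-- ===== PORT A =====
-- loop body of grouping_by_labels' for-loop (state: prev_i, subgroup, res)
def stepA {α : Type} (s : Option Int × List α × List (List α)) (ij : Int × α) :
    Option Int × List α × List (List α) :=
  if s.1 ≠ some ij.1 then (some ij.1, [ij.2], s.2.2 ++ [s.2.1])
  else (some ij.1, s.2.1 ++ [ij.2], s.2.2)

def groupingByLabels {α : Type} (data_list : List α) (grouping_list : List Int) : List (List α) :=
  let data := grouping_list.zip data_list
  let data := PySem.List.sorted data (fun x => x.1)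
  let st := data.foldl stepA (none, [], [])
  PySem.List.slice (st.2.2 ++ [st.2.1]) (some 1) none

def group_by2factors (f1 : List Int) (f2 : List Int) (d : List Int) : List (List (List Int)) :=
  let f2_d := f2.zip d
  let gf1 := groupingByLabels f2_d f1
  gf1.foldl (fun res sublist =>
    res ++ [groupingByLabels (sublist.map (fun i => i.2)) (sublist.map (fun i => i.1))]) []

-- ===== PORT B =====
def groupingByLabelsAlt {α : Type} (data_list : List α) (grouping_list : List Int) : List (List α) :=
  let groups := (grouping_list.zip data_list).foldl
      (fun (g : PySem.Dict Int (List α)) p => g.modify p.1 [] (fun v => v ++ [p.2]))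
      PySem.Dict.empty
  (PySem.List.sorted groups.keys (fun x => x)).map (fun k => groups.getD k [])

def group_by2factors_alt (f1 : List Int) (f2 : List Int) (d : List Int) : List (List (List Int)) :=
  let pairs := f2.zip d
  let outer := groupingByLabelsAlt pairs f1
  outer.map (fun g => groupingByLabelsAlt (g.map (fun p => p.2)) (g.map (fun p => p.1)))

-- ===== PRECONDITION & SPEC =====
def Spec_group_by2factors (f1 : List Int) (f2 : List Int) (d : List Int) (out : List (List (List Int))) : Prop := out = group_by2factors_alt f1 f2 d
instance (f1 : List Int) (f2 : List Int) (d : List Int) (out : List (List (List Int))) : Decidable (Spec_group_by2factors f1 f2 d out) := by unfold Spec_group_by2factors; infer_instance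

-- ===== CLAIM (what is proved, stated in full; the proofs are below) =====
def Claim_equal_group_by2factors : Prop := ∀ (f1 : List Int) (f2 : List Int) (d : List Int), Dom_group_by2factors f1 f2 d → Spec_group_by2factors f1 f2 d (group_by2factors f1 f2 d)

-- ===== LEMMAS AND PROOFS =====

-- sorted distinct keys of a pair list
def keysOf {α : Type} (ps : List (Int × α)) : List Int :=
  PySem.List.sorted (PySem.Set.ofList (ps.map (fun p => p.1))) (fun x => x)

-- the block of ps belonging to key k (original order)
def blockOf {α : Type} (ps : List (Int × α)) (k : Int) : List (Int × α) :=
  ps.filter (fun p => p.1 == k)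

theorem keysOf_pairwise {α : Type} (ps : List (Int × α)) :
    (keysOf ps).Pairwise (· < ·) := by
  exact PySem.List.sorted_ofList_pairwise_lt _


-- insertBy skips a prefix it does not go before
theorem insertBy_append_of_not_before {α : Type} (before : α → α → Bool) (x : α) :
    ∀ (l t : List α), (∀ y ∈ l, before x y = false) →
      PySem.List.insertBy before x (l ++ t) = l ++ PySem.List.insertBy before x t := by
  intro l
  induction l with
  | nil => intro t _; simp
  | cons y ys ih =>
    intro t h
    simp only [List.cons_append, PySem.List.insertBy, h y (by simp)]
    simp [ih t (fun z hz => h z (by simp [hz]))]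


-- insertBy at the front when it goes before everything
theorem insertBy_front {α : Type} (before : α → α → Bool) (x : α) (l : List α)
    (h : ∀ y ∈ l, before x y = true) :
    PySem.List.insertBy before x l = x :: l := by
  cases l with
  | nil => rfl
  | cons y ys => simp [PySem.List.insertBy, h y (by simp)]


theorem dropWhile_gt (a : Int) :
    ∀ (K : List Int), K.Pairwise (· < ·) → ∀ y ∈ K.dropWhile (fun k => k ≤ a), a < y := by
  intro K
  induction K with
  | nil => simp
  | cons k K' ih =>
    intro hp y hy
    by_cases hk : k ≤ a
    · exact ih hp.of_cons y (by simpa [List.dropWhile_cons, hk] using hy)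
    · simp only [List.dropWhile_cons, hk, decide_false] at hy
      rcases List.mem_cons.mp hy with rfl | hy'
      · omega
      · have := List.rel_of_pairwise_cons hp hy'
        omega


-- inserting one pair into a keyed-block concatenation splits at its key
theorem insertBy_flatMap {α : Type} (x : Int × α) :
    ∀ (K : List Int), K.Pairwise (· < ·) →
    ∀ (g : Int → List (Int × α)), (∀ k ∈ K, ∀ p ∈ g k, p.1 = k) →
      PySem.List.insertBy (fun a b => decide (a.1 < b.1)) x (K.flatMap g)
        = ((K.takeWhile (fun k => k ≤ x.1)).flatMap g) ++ x :: ((K.dropWhile (fun k => k ≤ x.1)).flatMap g) := by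
  intro K
  induction K with
  | nil => intro _ g _; simp [PySem.List.insertBy]
  | cons k K' ih =>
    intro hp g hg
    by_cases hk : k ≤ x.1
    · have hblock : ∀ y ∈ g k, (fun a b => decide (a.1 < b.1)) x y = false := by
        intro y hy
        have : y.1 = k := hg k (by simp) y hy
        simp only [decide_eq_false_iff_not, not_lt]
        omega
      have hrest : ∀ k' ∈ K', ∀ p ∈ g k', p.1 = k' :=
        fun k' hk' p hpp => hg k' (by simp [hk']) p hpp
      simp only [List.flatMap_cons, List.takeWhile_cons, List.dropWhile_cons, hk, decide_true]
      rw [insertBy_append_of_not_before _ _ _ _ hblock, ih hp.of_cons g hrest]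
      simp
    · have hall : ∀ y ∈ (k :: K').flatMap g, (fun a b => decide (a.1 < b.1)) x y = true := by
        intro y hy
        rcases List.mem_flatMap.mp hy with ⟨k', hk', hy'⟩
        have h1 : y.1 = k' := hg k' hk' y hy'
        have h2 : k ≤ k' := by
          rcases List.mem_cons.mp hk' with rfl | h
          · omega
          · have := List.rel_of_pairwise_cons hp h; omega
        simp only [decide_eq_true_eq]
        omega
      rw [insertBy_front _ _ _ hall]
      simp [hk]


-- a sorted, bounded list containing its bound ends with it
theorem ends_with_of_mem (a : Int) :
    ∀ (T : List Int), T.Pairwise (· < ·) → (∀ y ∈ T, y ≤ a) → a ∈ T →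
      ∃ T', T = T' ++ [a] ∧ a ∉ T' := by
  intro T
  induction T with
  | nil => simp
  | cons t ts ih =>
    intro hp hle hmem
    rcases List.mem_cons.mp hmem with rfl | hmem'
    · cases hts : ts with
      | nil => exact ⟨[], rfl, by simp⟩
      | cons u us =>
        exfalso
        have h1 : a < u := List.rel_of_pairwise_cons hp (show u ∈ ts by simp [hts])
        have h2 : u ≤ a := hle u (by simp [hts])
        omega
    · obtain ⟨T', hT', hnot⟩ := ih hp.of_cons (fun y hy => hle y (by simp [hy])) hmem'
      refine ⟨t :: T', by simp [hT'], ?_⟩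
      have ht : t < a := List.rel_of_pairwise_cons hp hmem'
      simp only [List.mem_cons, not_or]
      exact ⟨by omega, hnot⟩


-- stable sort by first component = concatenation of key blocks in sorted key order
theorem blockOf_fst {α : Type} (ps : List (Int × α)) (k : Int) :
    ∀ p ∈ blockOf ps k, p.1 = k := by
  intro p hp
  have := (List.mem_filter.mp hp).2
  simpa using this

theorem blockOf_append_singleton {α : Type} (ps : List (Int × α)) (x : Int × α) (k : Int) :
    blockOf (ps ++ [x]) k = blockOf ps k ++ (if x.1 == k then [x] else []) := by
  simp only [blockOf, List.filter_append, List.filter_cons, List.filter_nil]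

theorem mem_keysOf {α : Type} (ps : List (Int × α)) (a : Int) :
    a ∈ keysOf ps ↔ a ∈ ps.map (fun p => p.1) := by
  rw [keysOf, PySem.List.mem_sorted, PySem.Set.mem_ofList]

theorem flatMap_blockOf_congr {α : Type} (ps : List (Int × α)) (x : Int × α) :
    ∀ (L : List Int), (∀ k ∈ L, k ≠ x.1) →
      L.flatMap (blockOf (ps ++ [x])) = L.flatMap (blockOf ps) := by
  intro L
  induction L with
  | nil => intro _; rfl
  | cons c L ih =>
    intro h
    have hc : (x.1 == c) = false := beq_eq_false_iff_ne.mpr (fun e => h c (by simp) e.symm)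
    simp only [List.flatMap_cons, blockOf_append_singleton, hc, Bool.false_eq_true, if_false,
      List.append_nil, ih (fun k hk => h k (by simp [hk]))]

theorem sortA {α : Type} (ps : List (Int × α)) :
    PySem.List.sorted ps (fun x => x.1) = (keysOf ps).flatMap (blockOf ps) := by
  induction ps using List.reverseRecOn with
  | nil => rfl
  | append_singleton ps x ih =>
    have hK := keysOf_pairwise ps
    rw [PySem.List.sorted_eq_foldl_insertBy, List.foldl_append, List.foldl_cons, List.foldl_nil,
      ← PySem.List.sorted_eq_foldl_insertBy, ih,
      insertBy_flatMap x (keysOf ps) hK (blockOf ps) (fun k _ => blockOf_fst ps k)]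
    set a := x.1 with ha
    set T := (keysOf ps).takeWhile (fun k => k ≤ a) with hT
    set D := (keysOf ps).dropWhile (fun k => k ≤ a) with hD
    have hTD : T ++ D = keysOf ps := List.takeWhile_append_dropWhile
    have hTp : T.Pairwise (· < ·) := List.Pairwise.sublist (List.takeWhile_sublist _) hK
    have hDp : D.Pairwise (· < ·) := List.Pairwise.sublist (List.dropWhile_sublist _) hK
    have hDgt : ∀ y ∈ D, a < y := dropWhile_gt a (keysOf ps) hK
    have hTle : ∀ y ∈ T, y ≤ a := fun y hy => by simpa using List.mem_takeWhile_imp hy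
    have hmapapp : (ps ++ [x]).map (fun p => p.1) = ps.map (fun p => p.1) ++ [a] := by simp [ha]
    by_cases hmem : a ∈ ps.map (fun p => p.1)
    · -- the key is already present: the distinct-key list is unchanged
      have hkeys : keysOf (ps ++ [x]) = keysOf ps := by
        unfold keysOf
        rw [hmapapp, PySem.Set.ofList_eq_foldl, List.foldl_append, ← PySem.Set.ofList_eq_foldl]
        have hadd : PySem.Set.add (PySem.Set.ofList (ps.map fun p => p.1)) a
            = PySem.Set.ofList (ps.map fun p => p.1) := by
          simp [PySem.Set.add, PySem.Set.contains, (PySem.Set.mem_ofList _ a).mpr hmem]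
        simp [hadd]
      have hanot : a ∉ D := fun h => absurd (hDgt a h) (lt_irrefl a)
      have hamem : a ∈ T := by
        have h1 : a ∈ keysOf ps := (mem_keysOf ps a).mpr hmem
        rw [← hTD] at h1
        rcases List.mem_append.mp h1 with h | h
        · exact h
        · exact absurd h hanot
      obtain ⟨T', hT', hnot⟩ := ends_with_of_mem a T hTp hTle hamem
      rw [hkeys, ← hTD, hT']
      simp only [List.flatMap_append, List.flatMap_cons, List.flatMap_nil]
      have hT'ne : ∀ k ∈ T', k ≠ x.1 := by
        intro k hk e
        apply hnot; rw [ha, ← e]; exact hk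
      have hDne : ∀ k ∈ D, k ≠ x.1 := by
        intro k hk e
        apply hanot; rw [ha, ← e]; exact hk
      rw [flatMap_blockOf_congr ps x T' hT'ne, flatMap_blockOf_congr ps x D hDne,
        blockOf_append_singleton]
      have hba : (x.1 == a) = true := by simp [ha]
      simp [hba]
    · -- fresh key: it is inserted between the smaller and the larger keys
      have hanotk : a ∉ keysOf ps := fun h => hmem ((mem_keysOf ps a).mp h)
      have hkeys : keysOf (ps ++ [x]) = T ++ a :: D := by
        unfold keysOf
        rw [hmapapp, PySem.Set.ofList_eq_foldl, List.foldl_append, ← PySem.Set.ofList_eq_foldl]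
        have hadd : PySem.Set.add (PySem.Set.ofList (ps.map fun p => p.1)) a
            = PySem.Set.ofList (ps.map fun p => p.1) ++ [a] := by
          have : ¬ a ∈ PySem.Set.ofList (ps.map fun p => p.1) := by
            rw [PySem.Set.mem_ofList]; exact hmem
          simp [PySem.Set.add, PySem.Set.contains, this]
        simp only [List.foldl_cons, List.foldl_nil, hadd]
        apply PySem.List.sorted_eq_of_perm_of_pairwise_lt
        · have p1 : (a :: D).Perm (D ++ [a]) := (List.perm_append_singleton a D).symm
          have p2 : (T ++ a :: D).Perm (T ++ D ++ [a]) := by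
            rw [List.append_assoc]
            exact List.Perm.append_left T p1
          have p3 : (T ++ D ++ [a]).Perm (PySem.Set.ofList (ps.map fun p => p.1) ++ [a]) := by
            rw [hTD]
            exact List.Perm.append_right [a] (PySem.List.sorted_perm _ _ _)
          exact p2.trans p3
        · rw [List.pairwise_append]
          refine ⟨hTp, List.pairwise_cons.mpr ⟨hDgt, hDp⟩, ?_⟩
          intro t ht y hy
          have h1 : t ≤ a := hTle t ht
          have h2 : t ≠ a := by
            intro e
            apply hanotk
            rw [← e, ← hTD]
            exact List.mem_append.mpr (Or.inl ht)
          rcases List.mem_cons.mp hy with rfl | hy'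
          · omega
          · have := hDgt y hy'; omega
      have hTne : ∀ k ∈ T, k ≠ x.1 := by
        intro k hk e
        apply hanotk
        rw [ha, ← e, ← hTD]
        exact List.mem_append.mpr (Or.inl hk)
      have hDne : ∀ k ∈ D, k ≠ x.1 := by
        intro k hk e
        have := hDgt k hk
        rw [ha] at this
        omega
      have hba : blockOf ps a = [] := by
        rw [blockOf, List.filter_eq_nil_iff]
        intro p hp
        simp only [beq_iff_eq]
        exact fun e => hmem (List.mem_map.mpr ⟨p, hp, e⟩)
      rw [hkeys]
      simp only [List.flatMap_append, List.flatMap_cons]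
      rw [flatMap_blockOf_congr ps x T hTne, flatMap_blockOf_congr ps x D hDne,
        blockOf_append_singleton, hba]
      have hbb : (x.1 == a) = true := by simp [ha]
      simp [hbb]


-- the boundary-scan loop over one block's tail just extends the subgroup
theorem loop_inner {α : Type} (k : Int) :
    ∀ (bs : List α) (sub : List α) (res : List (List α)),
      (bs.map (fun a => (k, a))).foldl stepA (some k, sub, res) = (some k, sub ++ bs, res) := by
  intro bs
  induction bs with
  | nil => simp
  | cons b bs ih =>
    intro sub res
    simp only [List.map_cons, List.foldl_cons, stepA, ne_eq, not_true_eq_false, if_neg,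
      not_false_eq_true, ih]
    simp


-- the boundary-scan loop over nonempty key blocks emits one group per key
theorem loop_blocks {α : Type} (g : Int → List α) :
    ∀ (K : List Int), K.Pairwise (· < ·) → (∀ k ∈ K, g k ≠ []) →
    ∀ (prev : Option Int) (sub : List α) (res : List (List α)),
      (∀ k ∈ K, prev ≠ some k) →
      (((K.flatMap (fun k => (g k).map (fun a => (k, a)))).foldl stepA (prev, sub, res)).2.2
          ++ [((K.flatMap (fun k => (g k).map (fun a => (k, a)))).foldl stepA (prev, sub, res)).2.1]
        = res ++ sub :: K.map g)
      ∧ (((K.flatMap (fun k => (g k).map (fun a => (k, a)))).foldl stepA (prev, sub, res)).1 = prev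
          ∨ ∃ k ∈ K, ((K.flatMap (fun k => (g k).map (fun a => (k, a)))).foldl stepA (prev, sub, res)).1 = some k) := by
  intro K
  induction K with
  | nil => intro _ _ prev sub res _; simp
  | cons k K' ih =>
    intro hp hne prev sub res hprev
    obtain ⟨b, bs, hbk⟩ : ∃ b bs, g k = b :: bs := by
      cases h : g k with
      | nil => exact absurd h (hne k (by simp))
      | cons b bs => exact ⟨b, bs, rfl⟩
    have hstep : stepA (prev, sub, res) (k, b) = (some k, [b], res ++ [sub]) := by
      simp [stepA, hprev k (by simp)]
    simp only [List.flatMap_cons, hbk, List.map_cons, List.foldl_append, List.foldl_cons, hstep,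
      loop_inner]
    have hK' : ∀ k' ∈ K', (some k : Option Int) ≠ some k' := by
      intro k' hk'
      have := List.rel_of_pairwise_cons hp hk'
      simp only [ne_eq, Option.some.injEq]
      omega
    obtain ⟨h1, h2⟩ := ih hp.of_cons (fun k' h => hne k' (by simp [h])) (some k) ([b] ++ bs)
      (res ++ [sub]) hK'
    refine ⟨?_, ?_⟩
    · rw [h1]; simp
    · rcases h2 with h | ⟨k', hk', h⟩
      · exact Or.inr ⟨k, by simp, h⟩
      · exact Or.inr ⟨k', by simp [hk'], h⟩


theorem gblA_eq {α : Type} (ds : List α) (ls : List Int) :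
    groupingByLabels ds ls = (keysOf (ls.zip ds)).map (fun k => (blockOf (ls.zip ds) k).map (fun p => p.2)) := by
  simp only [groupingByLabels]
  rw [sortA]
  set ps := ls.zip ds with hps
  set g : Int → List α := fun k => (blockOf ps k).map (fun p => p.2) with hg
  have hne : ∀ k ∈ keysOf ps, g k ≠ [] := by
    intro k hk
    rcases List.mem_map.mp ((mem_keysOf ps k).mp hk) with ⟨p, hp, hpk⟩
    have hb : blockOf ps k ≠ [] :=
      List.ne_nil_of_mem (List.mem_filter.mpr ⟨hp, by simp [hpk]⟩)
    simp only [hg, ne_eq, List.map_eq_nil_iff]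
    exact hb
  obtain ⟨h1, -⟩ := loop_blocks g (keysOf ps) (keysOf_pairwise ps) hne none [] [] (by simp)
  have hfun : (fun k => (g k).map (fun a => (k, a))) = blockOf ps := by
    funext k
    rw [hg]
    simp only [List.map_map]
    have hid : ∀ p ∈ blockOf ps k, ((fun a => (k, a)) ∘ fun p => p.2) p = id p := by
      intro p hp
      have := blockOf_fst ps k p hp
      simp only [Function.comp, id]
      exact Prod.ext this.symm rfl
    rw [List.map_congr_left hid, List.map_id]
  rw [hfun] at h1
  rw [h1, PySem.List.slice_from_one]
  simp


theorem gblB_eq {α : Type} (ds : List α) (ls : List Int) :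
    groupingByLabelsAlt ds ls = (keysOf (ls.zip ds)).map (fun k => (blockOf (ls.zip ds) k).map (fun p => p.2)) := by
  simp only [groupingByLabelsAlt, keysOf]
  rw [PySem.Dict.keys_foldl_modify_key (ls.zip ds) (fun p => p.1) [] (fun _ p v => v ++ [p.2])
    PySem.Dict.empty]
  have hk : PySem.Set.update (PySem.Dict.empty : PySem.Dict Int (List α)).keys
        ((ls.zip ds).map fun p => p.1)
      = PySem.Set.ofList ((ls.zip ds).map fun p => p.1) := rfl
  rw [hk]
  apply List.map_congr_left
  intro k _
  rw [PySem.Dict.getD_foldl_modify_append]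
  simp [blockOf]


theorem gbl_eq {α : Type} (ds : List α) (ls : List Int) :
    groupingByLabels ds ls = groupingByLabelsAlt ds ls := by
  rw [gblA_eq, gblB_eq]

-- ===== VERDICT (by name: the statement is the Claim_ definition above) =====
theorem group_by2factors_spec : Claim_equal_group_by2factors := by
  intro f1 f2 d _
  unfold Spec_group_by2factors group_by2factors group_by2factors_alt
  simp only [PySem.List.foldl_append_singleton_eq_map, List.nil_append, gbl_eq]
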